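-- pv_equiv track=rewrite | github.com/shubhlodhi/advanced_dsa_concepts | hashing/consecutive.py | consecutive_EA
-- ===== SOURCE A (Python) =====
-- def consecutive_EA(a,n):
--     set_a = set(a)
--     x = a[0]
--     res =0
--     for i in range(0,n):
--       if a[i]-1 not in set_a:
--         result =0
--         # res = a[i]
--         for j in range(0,n):
--            if (a[i]+j) in set_a:
--             result+=1
--
--         res = max(res,result)
--       else:
--          continue
--     return res
-- ===== SOURCE B (Python) =====
-- def consecutive_EA(a, n):
--     s = set(a)
--     vals = sorted(s)                       # distinct values, ascending
--     starts = sorted(set(a[:n])) if n > 0 else []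
--     res = 0
--     lo = 0                                 # two monotone pointers into vals
--     hi = 0
--     for v in starts:
--         if v - 1 not in s:
--             while lo < len(vals) and vals[lo] < v:
--                 lo += 1
--             while hi < len(vals) and vals[hi] < v + n:
--                 hi += 1
--             if hi - lo > res:
--                 res = hi - lo
--     return res
-- ===== Notes on version B (the rewrite author's own statement) =====
-- stated objective: faster
-- what changed: A probes, for each of the first n indices, all n offsets a[i]+j against a set (quadratic); B sorts the distinct values once and sweeps the sorted distinct candidate starts with two monotone pointers delimiting the window [v, v+n), so each pointer moves O(m) total.
import Mathlib
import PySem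

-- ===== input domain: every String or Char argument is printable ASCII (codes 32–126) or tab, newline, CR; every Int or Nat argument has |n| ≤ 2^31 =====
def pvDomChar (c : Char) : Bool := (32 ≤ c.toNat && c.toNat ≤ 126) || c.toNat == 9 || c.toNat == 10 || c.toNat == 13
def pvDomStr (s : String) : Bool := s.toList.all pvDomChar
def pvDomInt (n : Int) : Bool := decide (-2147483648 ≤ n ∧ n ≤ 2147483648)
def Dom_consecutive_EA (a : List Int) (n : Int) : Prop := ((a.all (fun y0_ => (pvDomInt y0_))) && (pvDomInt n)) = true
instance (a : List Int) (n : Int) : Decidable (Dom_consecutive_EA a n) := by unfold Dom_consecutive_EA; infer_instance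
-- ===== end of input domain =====

-- B replaces A's quadratic per-start offset probing by one sort of the distinct values and a sweep of the
-- sorted distinct candidate starts with two monotone pointers delimiting the window [v, v+n); objective: faster.

-- ===== PORT A =====
def consecutive_EA (a : List Int) (n : Int) : Int :=
  let set_a : PySem.Set Int := PySem.Set.ofList a
  let _x : Int := PySem.List.pyGetD a 0 0   -- a[0]; IndexError on empty a is excluded by Pre_
  (PySem.List.pyRange 0 n 1).foldl (fun res i =>
    if ¬ (set_a.contains (PySem.List.pyGetD a i 0 - 1) = true) then
      let result : Int := (PySem.List.pyRange 0 n 1).foldl (fun result j =>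
        if set_a.contains (PySem.List.pyGetD a i 0 + j) = true then result + 1 else result) 0
      max res result
    else res) 0

-- ===== PORT B =====
-- helper: the Python 'while lo < len(vals) and vals[lo] < v: lo += 1' loop
def pvAdvance (vals : List Int) (lo v : Int) : Int :=
  if h : lo < (vals.length : Int) ∧ PySem.List.pyGetD vals lo 0 < v then
    pvAdvance vals (lo + 1) v
  else lo
termination_by ((vals.length : Int) - lo).toNat
decreasing_by omega

-- helper: the body of the Python 'for v in starts' loop on the state (res, lo, hi)
def pvStep (s : PySem.Set Int) (vals : List Int) (n : Int) (st : Int × Int × Int) (v : Int) : Int × Int × Int :=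
  if ¬ (s.contains (v - 1) = true) then
    let lo' := pvAdvance vals st.2.1 v
    let hi' := pvAdvance vals st.2.2 (v + n)
    if hi' - lo' > st.1 then (hi' - lo', lo', hi') else (st.1, lo', hi')
  else st

def consecutive_EA_alt (a : List Int) (n : Int) : Int :=
  let s : PySem.Set Int := PySem.Set.ofList a
  let vals : List Int := PySem.List.sorted s (fun x => x) false
  let starts : List Int :=
    if n > 0 then PySem.List.sorted (PySem.Set.ofList (PySem.List.slice a none (some n))) (fun x => x) false else []
  (starts.foldl (pvStep s vals n) ((0 : Int), (0 : Int), (0 : Int))).1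

-- ===== PRECONDITION & SPEC =====
-- Pre_ excludes exactly the inputs where A raises IndexError: empty a (at a[0]) or n > len(a) (at a[i]).
def Pre_consecutive_EA (a : List Int) (n : Int) : Prop := a ≠ [] ∧ n ≤ (a.length : Int)
instance (a : List Int) (n : Int) : Decidable (Pre_consecutive_EA a n) := by unfold Pre_consecutive_EA; infer_instance
def pvWitness_consecutive_EA : List Int × Int := ([1, 2, 5], 3)

def Spec_consecutive_EA (a : List Int) (n : Int) (out : Int) : Prop := out = consecutive_EA_alt a n
instance (a : List Int) (n : Int) (out : Int) : Decidable (Spec_consecutive_EA a n out) := by unfold Spec_consecutive_EA; infer_instance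

-- ===== CLAIM (what is proved, stated in full; the proofs are below) =====
def Claim_equal_consecutive_EA : Prop := ∀ (a : List Int) (n : Int), Dom_consecutive_EA a n → Pre_consecutive_EA a n → Spec_consecutive_EA a n (consecutive_EA a n)

-- ===== LEMMAS AND PROOFS =====

-- number of distinct values strictly below v (as Int), the value both pointers converge to
def pvCnt (vals : List Int) (v : Int) : Int := (vals.countP (fun u => decide (u < v)) : Int)

theorem pvCnt_nonneg (vals : List Int) (v : Int) : 0 ≤ pvCnt vals v := by
  simp [pvCnt]

theorem pvCnt_le_len (vals : List Int) (v : Int) : pvCnt vals v ≤ (vals.length : Int) := by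
  simp only [pvCnt]
  exact_mod_cast List.countP_le_length

theorem pvCnt_mono (vals : List Int) (v w : Int) (h : v ≤ w) : pvCnt vals v ≤ pvCnt vals w := by
  simp only [pvCnt]
  exact_mod_cast List.countP_mono_left (fun x _ hx => by simp at hx ⊢; omega)

-- in a sorted list, the elements < v are exactly the first countP-many
theorem sorted_lt_iff (l : List Int) (hl : l.Pairwise (· ≤ ·)) (v : Int) (i : Nat) (hi : i < l.length) :
    l[i] < v ↔ i < l.countP (fun u => decide (u < v)) := by
  induction l generalizing i with
  | nil => simp at hi
  | cons x t ih =>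
    have hx : ∀ y ∈ t, x ≤ y := (List.pairwise_cons.1 hl).1
    have ht : t.Pairwise (· ≤ ·) := (List.pairwise_cons.1 hl).2
    by_cases hxv : x < v
    · cases i with
      | zero => simpa [List.countP_cons, hxv]
      | succ j =>
        have hj : j < t.length := by simpa using hi
        have := ih ht j hj
        simp only [List.countP_cons, hxv]
        simpa [Nat.succ_lt_succ_iff] using this
    · have hz : t.countP (fun u => decide (u < v)) = 0 := by
        rw [List.countP_eq_zero]
        intro y hy
        have := hx y hy
        simp only [decide_eq_true_eq]
        omega
      cases i with
      | zero => simp [List.countP_cons, hxv, hz]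
      | succ j =>
        have hj : j < t.length := by simpa using hi
        have hyt := hx _ (List.getElem_mem hj)
        have hnl : ¬ t[j] < v := by omega
        simp [List.countP_cons, hz, hxv, hnl]

theorem advance_eq (vals : List Int) (hv : vals.Pairwise (· ≤ ·)) (v lo : Int)
    (h0 : 0 ≤ lo) (hle : lo ≤ pvCnt vals v) : pvAdvance vals lo v = pvCnt vals v := by
  have hcl : pvCnt vals v ≤ (vals.length : Int) := pvCnt_le_len vals v
  generalize hk : (pvCnt vals v - lo).toNat = k
  induction k generalizing lo with
  | zero =>
    have hlo : lo = pvCnt vals v := by omega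
    subst hlo
    rw [pvAdvance]
    rw [dif_neg]
    rintro ⟨h1, h2⟩
    have hi : (pvCnt vals v).toNat < vals.length := by omega
    have hget : PySem.List.pyGetD vals (pvCnt vals v) 0 = vals[(pvCnt vals v).toNat] := by
      rw [PySem.List.pyGetD_of_nonneg vals 0 (pvCnt_nonneg vals v)]
      rw [List.getD_eq_getElem?_getD, List.getElem?_eq_getElem hi]
      rfl
    rw [hget] at h2
    have := (sorted_lt_iff vals hv v _ hi).1 h2
    simp only [pvCnt] at *
    omega
  | succ k ih =>
    have hlt : lo < pvCnt vals v := by omega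
    have hlen : lo < (vals.length : Int) := by omega
    have hi : lo.toNat < vals.length := by omega
    have hget : PySem.List.pyGetD vals lo 0 = vals[lo.toNat] := by
      rw [PySem.List.pyGetD_of_nonneg vals 0 h0]
      rw [List.getD_eq_getElem?_getD, List.getElem?_eq_getElem hi]
      rfl
    have hv2 : vals[lo.toNat] < v := by
      apply (sorted_lt_iff vals hv v _ hi).2
      simp only [pvCnt] at hlt ⊢
      omega
    rw [pvAdvance, dif_pos ⟨hlen, by rw [hget]; exact hv2⟩]
    exact ih (lo + 1) (by omega) (by omega) (by omega)

-- splitting the count below v+n at v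
theorem cnt_split (vals : List Int) (v n : Int) (hn : 0 ≤ n) :
    pvCnt vals (v + n) = pvCnt vals v + (vals.countP (fun u => decide (v ≤ u ∧ u < v + n)) : Int) := by
  simp only [pvCnt]
  have : vals.countP (fun u => decide (u < v + n))
      = vals.countP (fun u => decide (u < v)) + vals.countP (fun u => decide (v ≤ u ∧ u < v + n)) := by
    induction vals with
    | nil => simp
    | cons x t ih =>
      rw [List.countP_cons, List.countP_cons, List.countP_cons, ih]
      by_cases h1 : x < v
      · rw [if_pos (by simp; omega), if_pos (by simpa using h1), if_neg (by simp; omega)]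
        omega
      · by_cases h2 : x < v + n
        · rw [if_pos (by simpa using h2), if_neg (by simpa using h1), if_pos (by simp; omega)]
          omega
        · rw [if_neg (by simpa using h2), if_neg (by simpa using h1), if_neg (by simp; omega)]
          omega
  rw [this]
  push_cast
  ring

-- evaluating one loop step
theorem pvStep_pos (s : PySem.Set Int) (vals : List Int) (n res lo hi v : Int)
    (hc : ¬ (s.contains (v - 1) = true)) :
    pvStep s vals n (res, lo, hi) v
      = (max res (pvAdvance vals hi (v + n) - pvAdvance vals lo v),
          pvAdvance vals lo v, pvAdvance vals hi (v + n)) := by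
  simp only [pvStep, if_pos hc]
  split_ifs with hgt
  · rw [max_eq_right hgt.le]
  · rw [max_eq_left (not_lt.1 hgt)]

theorem pvStep_neg (s : PySem.Set Int) (vals : List Int) (n res lo hi v : Int)
    (hc : ¬ ¬ (s.contains (v - 1) = true)) :
    pvStep s vals n (res, lo, hi) v = (res, lo, hi) := by
  simp only [pvStep, if_neg hc]

-- the two-pointer sweep computes the same guarded running maximum
theorem tp_fold (s : PySem.Set Int) (n : Int)
    (vals : List Int) (hv : vals.Pairwise (· ≤ ·))
    (starts : List Int) (hs : starts.Pairwise (· < ·))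
    (res lo hi : Int) (hlo0 : 0 ≤ lo) (hhi0 : 0 ≤ hi)
    (hinv : ∀ v, starts.head? = some v → lo ≤ pvCnt vals v ∧ hi ≤ pvCnt vals (v + n)) :
    (starts.foldl (pvStep s vals n) (res, lo, hi)).1
      = starts.foldl (fun res v =>
          if ¬ (s.contains (v - 1) = true) then
            max res (pvCnt vals (v + n) - pvCnt vals v) else res) res := by
  induction starts generalizing res lo hi with
  | nil => simp
  | cons v t ih =>
    have hvt : ∀ x ∈ t, v < x := (List.pairwise_cons.1 hs).1
    have ht : t.Pairwise (· < ·) := (List.pairwise_cons.1 hs).2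
    have hinv_v := hinv v rfl
    have hinvt : ∀ w, t.head? = some w →
        pvCnt vals v ≤ pvCnt vals w ∧ pvCnt vals (v + n) ≤ pvCnt vals (w + n) := by
      intro w hw
      have hvw := hvt w (List.mem_of_mem_head? hw)
      exact ⟨pvCnt_mono vals v w (by omega), pvCnt_mono vals (v + n) (w + n) (by omega)⟩
    simp only [List.foldl_cons]
    by_cases hc : ¬ (s.contains (v - 1) = true)
    · have hlo' : pvAdvance vals lo v = pvCnt vals v :=
        advance_eq vals hv v lo hlo0 hinv_v.1
      have hhi' : pvAdvance vals hi (v + n) = pvCnt vals (v + n) :=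
        advance_eq vals hv (v + n) hi hhi0 hinv_v.2
      rw [pvStep_pos s vals n res lo hi v hc, hlo', hhi', if_pos hc]
      exact ih ht _ _ _ (pvCnt_nonneg vals v) (pvCnt_nonneg vals (v + n)) hinvt
    · rw [pvStep_neg s vals n res lo hi v hc, if_neg hc]
      apply ih ht _ _ _ hlo0 hhi0
      intro w hw
      have hvw := hvt w (List.mem_of_mem_head? hw)
      have h1 := hinv_v.1
      have h2 := hinv_v.2
      have hm1 := pvCnt_mono vals v w (by omega)
      have hm2 := pvCnt_mono vals (v + n) (w + n) (by omega)
      constructor <;> omega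

-- guarded running max lemmas (A side)
theorem gm_le_foldl (P : Int → Prop) [DecidablePred P] (f : Int → Int) (l : List Int) (i : Int) :
    i ≤ l.foldl (fun res v => if P v then max res (f v) else res) i := by
  induction l generalizing i with
  | nil => simp
  | cons x t ih =>
    simp only [List.foldl_cons]
    refine le_trans ?_ (ih _)
    split_ifs <;> simp

theorem gm_mem_le (P : Int → Prop) [DecidablePred P] (f : Int → Int) (l : List Int) (i : Int)
    (x : Int) (hx : x ∈ l) (hp : P x) :
    f x ≤ l.foldl (fun res v => if P v then max res (f v) else res) i := by
  induction l generalizing i with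
  | nil => simp at hx
  | cons y t ih =>
    simp only [List.foldl_cons]
    rcases List.mem_cons.1 hx with rfl | hx'
    · refine le_trans ?_ (gm_le_foldl P f t _)
      simp [hp]
    · exact ih _ hx'

theorem gm_foldl_le (P : Int → Prop) [DecidablePred P] (f : Int → Int) (l : List Int) (i c : Int)
    (hi : i ≤ c) (h : ∀ x ∈ l, P x → f x ≤ c) :
    l.foldl (fun res v => if P v then max res (f v) else res) i ≤ c := by
  induction l generalizing i with
  | nil => simpa
  | cons y t ih =>
    simp only [List.foldl_cons]
    refine ih _ ?_ (fun x hx hp => h x (List.mem_cons_of_mem _ hx) hp)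
    split_ifs with hy
    · exact max_le hi (h y (List.mem_cons_self) hy)
    · exact hi

theorem gm_members (P : Int → Prop) [DecidablePred P] (f : Int → Int) (l₁ l₂ : List Int) (i : Int)
    (h : ∀ x, x ∈ l₁ ↔ x ∈ l₂) :
    l₁.foldl (fun res v => if P v then max res (f v) else res) i
      = l₂.foldl (fun res v => if P v then max res (f v) else res) i := by
  refine le_antisymm ?_ ?_
  · exact gm_foldl_le P f l₁ i _ (gm_le_foldl P f l₂ i)
      (fun x hx hp => gm_mem_le P f l₂ i x ((h x).1 hx) hp)
  · exact gm_foldl_le P f l₂ i _ (gm_le_foldl P f l₁ i)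
      (fun x hx hp => gm_mem_le P f l₁ i x ((h x).2 hx) hp)

-- nodup intersection-count symmetry
theorem countP_mem_comm (l₁ l₂ : List Int) (h₁ : l₁.Nodup) (h₂ : l₂.Nodup) :
    l₁.countP (fun x => decide (x ∈ l₂)) = l₂.countP (fun x => decide (x ∈ l₁)) := by
  have key : ∀ (u w : List Int), u.Nodup →
      u.countP (fun x => decide (x ∈ w)) = (u.toFinset ∩ w.toFinset).card := by
    intro u w hu
    rw [List.countP_eq_length_filter]
    have hnf : (u.filter (fun x => decide (x ∈ w))).Nodup := hu.filter _
    rw [← List.toFinset_card_of_nodup hnf, List.toFinset_filter]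
    congr 1
    ext x
    simp [Finset.mem_filter, List.mem_toFinset]
  rw [key _ _ h₁, key _ _ h₂, Finset.inter_comm]

theorem pyRange_shift (v n : Int) :
    PySem.List.pyRange v (v + n) 1 = (PySem.List.pyRange 0 n 1).map (fun j => v + j) := by
  rw [PySem.List.pyRange_one, PySem.List.pyRange_one, List.map_map]
  simp [add_sub_cancel_left, Function.comp]

-- A's inner offset-probing loop counts the distinct values in the window [v, v+n)
theorem inner_eq (a : List Int) (n v : Int) :
    (PySem.List.pyRange 0 n 1).foldl (fun result j =>
        if (PySem.Set.ofList a).contains (v + j) = true then result + 1 else result) (0 : Int)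
      = ((PySem.List.sorted (PySem.Set.ofList a) (fun x => x) false).countP
          (fun u => decide (v ≤ u ∧ u < v + n)) : Int) := by
  rw [PySem.List.foldl_if_add_one]
  simp only [zero_add]
  have hgoal : (PySem.List.pyRange 0 n 1).countP (fun j => (PySem.Set.ofList a).contains (v + j))
      = (PySem.List.sorted (PySem.Set.ofList a) (fun x => x) false).countP
          (fun u => decide (v ≤ u ∧ u < v + n)) := by
    have hperm := PySem.List.sorted_perm (PySem.Set.ofList a) (fun x => x) false
    rw [hperm.countP_eq]
    have h1 : (PySem.List.pyRange 0 n 1).countP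
        (fun j => (PySem.Set.ofList a).contains (v + j))
        = (PySem.List.pyRange v (v + n) 1).countP (fun u => (PySem.Set.ofList a).contains u) := by
      rw [pyRange_shift, List.countP_map]
      rfl
    rw [h1]
    have h2 : (PySem.List.pyRange v (v + n) 1).countP (fun u => (PySem.Set.ofList a).contains u)
        = (PySem.List.pyRange v (v + n) 1).countP (fun u => decide (u ∈ PySem.Set.ofList a)) := by
      apply List.countP_congr
      intro u _
      simp
    rw [h2, countP_mem_comm _ _ (PySem.List.nodup_pyRange_one v (v+n)) (PySem.Set.nodup_ofList a)]
    apply List.countP_congr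
    intro u _
    simp [PySem.List.mem_pyRange_one]
  exact_mod_cast hgoal

theorem foldl_pyRange_take (a : List Int) (n : Int) (hn : 0 ≤ n) (hlen : n ≤ (a.length : Int))
    (F : Int → Int → Int) (d init : Int) :
    (PySem.List.pyRange 0 n 1).foldl (fun acc i => F acc (PySem.List.pyGetD a i d)) init
      = (a.take n.toNat).foldl F init := by
  have h1 : (PySem.List.pyRange 0 n 1).foldl (fun acc i => F acc (PySem.List.pyGetD a i d)) init
      = (PySem.List.pyRange 0 n 1).foldl (fun acc i => F acc (PySem.List.pyGetD (a.take n.toNat) i d)) init := by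
    apply PySem.List.foldl_congr_mem
    intro acc i hi
    have hmem := (PySem.List.mem_pyRange_one).1 hi
    congr 1
    rw [PySem.List.pyGetD_of_nonneg a d hmem.1, PySem.List.pyGetD_of_nonneg (a.take n.toNat) d hmem.1]
    rw [List.getD_eq_getElem?_getD, List.getD_eq_getElem?_getD, List.getElem?_take, if_pos (by omega)]
  rw [h1]
  set t := a.take n.toNat with ht
  have hlt : ((t.length : Int)) = n := by
    rw [ht]
    simp [List.length_take]
    omega
  rw [← hlt]
  exact PySem.List.foldl_pyRange_zero_pyGetD' t d F init

theorem consecutive_EA_eq_alt (a : List Int) (n : Int) (hlen : n ≤ (a.length : Int)) :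
    consecutive_EA a n = consecutive_EA_alt a n := by
  by_cases hn : n ≤ 0
  · have hr : PySem.List.pyRange 0 n 1 = [] := PySem.List.pyRange_one_eq_nil hn
    have hs : (if n > 0 then PySem.List.sorted (PySem.Set.ofList (PySem.List.slice a none (some n))) (fun x => x) false else []) = [] :=
      if_neg (by omega)
    simp [consecutive_EA, consecutive_EA_alt, hr, hs]
  · replace hn : 0 < n := by omega
    simp only [consecutive_EA, consecutive_EA_alt]
    set vals : List Int := PySem.List.sorted (PySem.Set.ofList a) (fun x => x) false with hvals
    have hvle : vals.Pairwise (· ≤ ·) := by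
      have := PySem.List.sorted_pairwise (PySem.Set.ofList a) (fun x : Int => x)
      simpa [hvals] using this
    have hs : (if n > 0 then PySem.List.sorted (PySem.Set.ofList (PySem.List.slice a none (some n))) (fun x => x) false else [])
        = PySem.List.sorted (PySem.Set.ofList (a.take n.toNat)) (fun x => x) false := by
      rw [if_pos (by omega), PySem.List.slice_to a (by omega)]
    rw [hs]
    set starts : List Int := PySem.List.sorted (PySem.Set.ofList (a.take n.toNat)) (fun x => x) false with hstarts
    have hsle : starts.Pairwise (· ≤ ·) := by
      have := PySem.List.sorted_pairwise (PySem.Set.ofList (a.take n.toNat)) (fun x : Int => x)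
      simpa [hstarts] using this
    have hsnd : starts.Nodup :=
      (PySem.List.sorted_perm (PySem.Set.ofList (a.take n.toNat)) (fun x => x) false).nodup_iff.2
        (PySem.Set.nodup_ofList _)
    have hslt : starts.Pairwise (· < ·) := by
      have := hsle.and (List.Pairwise.imp (fun h => h) hsnd)
      exact this.imp (fun h => lt_of_le_of_ne h.1 h.2)
    -- A side: index loop over the first n elements = guarded max fold over those elements,
    -- then over the membership-equal list 'starts'
    have hA := foldl_pyRange_take a n (by omega) hlen
      (fun res v =>
        if ¬ ((PySem.Set.ofList a).contains (v - 1) = true) then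
          max res ((PySem.List.pyRange 0 n 1).foldl (fun result j =>
            if (PySem.Set.ofList a).contains (v + j) = true then result + 1 else result) (0 : Int))
        else res) 0 0
    rw [hA]
    have hmem : ∀ x, x ∈ a.take n.toNat ↔ x ∈ starts := by
      intro x
      rw [hstarts, PySem.List.mem_sorted, PySem.Set.mem_ofList]
    rw [gm_members _ _ (a.take n.toNat) starts 0 hmem]
    -- B side: the two-pointer sweep = the same guarded max fold
    rw [tp_fold (PySem.Set.ofList a) n vals hvle starts hslt 0 0 0 le_rfl le_rfl
        (fun v _ => ⟨pvCnt_nonneg vals v, pvCnt_nonneg vals (v + n)⟩)]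
    apply PySem.List.foldl_congr_mem
    intro acc v _
    rw [inner_eq a n v, ← hvals]
    have hw : ((vals.countP (fun u => decide (v ≤ u ∧ u < v + n)) : Nat) : Int)
        = pvCnt vals (v + n) - pvCnt vals v := by
      have := cnt_split vals v n (by omega)
      omega
    rw [hw]

-- ===== VERDICT (by name: the statement is the Claim_ definition above) =====
theorem consecutive_EA_spec : Claim_equal_consecutive_EA := by
  intro a n _ hpre
  unfold Spec_consecutive_EA
  exact consecutive_EA_eq_alt a n hpre.2
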